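-- pv_equiv track=rewrite | github.com/manavparmar43/Resume_eassy_django_api | document/helper.py | divide_paragraph
-- ===== SOURCE A (Python) =====
-- def divide_paragraph(obj):
--     words = obj.split()
--     num_words = len(words)
--     paragraphs = []
--     current_paragraph = []
--     for i in range(num_words):
--         current_paragraph.append(words[i])
--         if len(current_paragraph) >= 200 and '.' in words[i]:
--             paragraphs.append(' '.join(current_paragraph))
--             current_paragraph = []
--     if current_paragraph:
--         paragraphs.append(' '.join(current_paragraph))
--     return paragraphs
-- ===== SOURCE B (Python) =====
-- def divide_paragraph(obj):
--     words = obj.split()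
--     cuts = []
--     count = 0
--     for i, w in enumerate(words):
--         count += 1
--         if count >= 200 and '.' in w:
--             cuts.append(i + 1)
--             count = 0
--     paragraphs = []
--     prev = 0
--     for cut in cuts:
--         paragraphs.append(' '.join(words[prev:cut]))
--         prev = cut
--     if prev < len(words):
--         paragraphs.append(' '.join(words[prev:]))
--     return paragraphs
-- ===== Notes on version B (the rewrite author's own statement) =====
-- stated objective: alternative
-- what changed: B replaces A's accumulate-and-flush of a growing current-paragraph list by a two-pass scheme: a first index scan records cut positions from a word counter, a second pass slices the word list at those cuts and joins each slice.
import Mathlib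
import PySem

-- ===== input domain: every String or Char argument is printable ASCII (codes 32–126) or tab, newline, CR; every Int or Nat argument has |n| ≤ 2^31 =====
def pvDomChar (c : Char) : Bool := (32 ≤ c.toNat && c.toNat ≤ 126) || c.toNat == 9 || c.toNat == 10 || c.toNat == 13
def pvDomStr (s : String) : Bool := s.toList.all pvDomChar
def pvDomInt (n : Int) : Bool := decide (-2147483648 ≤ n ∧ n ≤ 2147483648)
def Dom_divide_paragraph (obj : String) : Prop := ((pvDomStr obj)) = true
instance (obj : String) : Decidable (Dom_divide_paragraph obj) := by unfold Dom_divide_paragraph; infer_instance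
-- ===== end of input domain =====

-- B replaces A's accumulate-and-flush paragraph building by a two-pass cuts-then-slices scheme
-- (alternative decomposition; same asymptotic cost).

-- shared helper: ' '.join(ws)
def pvJoinSp (ws : List String) : String := PySem.Str.join " " ws

-- ===== PORT A =====
-- A's for-loop over words carrying (paragraphs, current_paragraph), with the final flush.
def pvALoop (paragraphs current : List String) : List String → List String
  | [] => if current ≠ [] then paragraphs ++ [pvJoinSp current] else paragraphs
  | w :: ws =>
    let current' := current ++ [w]
    if 200 ≤ current'.length ∧ PySem.Str.isIn "." w = true then
      pvALoop (paragraphs ++ [pvJoinSp current']) [] ws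
    else
      pvALoop paragraphs current' ws

def divide_paragraph (obj : String) : List String :=
  pvALoop [] [] (PySem.Str.split₀ obj)

-- ===== PORT B =====
-- first pass: enumerate the words keeping a counter, record cut indices i+1
def pvBCuts (i count : Nat) : List String → List Nat
  | [] => []
  | w :: ws =>
    let count' := count + 1
    if 200 ≤ count' ∧ PySem.Str.isIn "." w = true then
      (i + 1) :: pvBCuts (i + 1) 0 ws
    else
      pvBCuts (i + 1) count' ws

-- second pass: slice words at consecutive cuts and join; trailing slice if prev < len(words)
def pvBRender (words : List String) (prev : Nat) : List Nat → List String
  | [] =>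
    if prev < words.length then
      [pvJoinSp (PySem.List.slice words (some (prev : Int)) none)]
    else []
  | c :: cs =>
    pvJoinSp (PySem.List.slice words (some (prev : Int)) (some (c : Int))) :: pvBRender words c cs

def divide_paragraph_alt (obj : String) : List String :=
  let words := PySem.Str.split₀ obj
  pvBRender words 0 (pvBCuts 0 0 words)

-- ===== PRECONDITION & SPEC =====
def Spec_divide_paragraph (obj : String) (out : List String) : Prop := out = divide_paragraph_alt obj
instance (obj : String) (out : List String) : Decidable (Spec_divide_paragraph obj out) := by unfold Spec_divide_paragraph; infer_instance

-- ===== CLAIM (what is proved, stated in full; the proofs are below) =====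
def Claim_equal_divide_paragraph : Prop := ∀ (obj : String), Dom_divide_paragraph obj → Spec_divide_paragraph obj (divide_paragraph obj)

-- ===== LEMMAS AND PROOFS =====

-- invariant: A's loop from state (acc, cur) with `done ++ cur` already consumed equals
-- acc followed by B's render of the cuts computed from position done.length + cur.length.
lemma pv_key : ∀ (rest done cur acc : List String),
    pvALoop acc cur rest
      = acc ++ pvBRender (done ++ cur ++ rest) done.length
            (pvBCuts (done.length + cur.length) cur.length rest) := by
  intro rest
  induction rest with
  | nil =>
    intro done cur acc
    simp only [pvALoop, pvBCuts, pvBRender, List.append_nil]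
    rcases cur with _ | ⟨c, cs⟩
    · simp
    · simp [PySem.List.slice_from_natCast]
  | cons w ws ih =>
    intro done cur acc
    simp only [pvALoop, pvBCuts]
    have hlen : (cur ++ [w]).length = cur.length + 1 := by simp
    by_cases hcond : 200 ≤ cur.length + 1 ∧ PySem.Str.isIn "." w = true
    · rw [if_pos (by simpa [hlen] using hcond), if_pos hcond]
      rw [ih (done ++ (cur ++ [w])) [] (acc ++ [pvJoinSp (cur ++ [w])])]
      simp only [pvBRender, List.append_nil, List.length_append, List.length_cons,
        List.length_nil, Nat.add_zero]
      have hslice :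
          PySem.List.slice (done ++ cur ++ w :: ws) (some (done.length : Int))
              (some ((done.length + cur.length + 1 : Nat) : Int))
            = cur ++ [w] := by
        rw [PySem.List.slice_natCast]
        have h1 : (done ++ cur ++ w :: ws).drop done.length = cur ++ w :: ws := by
          rw [List.append_assoc]; simp
        rw [h1]
        have h2 : done.length + cur.length + 1 - done.length = cur.length + 1 := by omega
        rw [h2]
        rw [show cur ++ w :: ws = (cur ++ [w]) ++ ws by simp]
        rw [List.take_append]
        simp
      rw [hslice]
      have h4 : done.length + (cur.length + (0 + 1)) = done.length + cur.length + 1 := by omega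
      have h5 : done ++ (cur ++ [w]) ++ ws = done ++ cur ++ w :: ws := by simp
      rw [h4, h5]
      simp [List.append_assoc]
    · rw [if_neg (by simpa [hlen] using hcond), if_neg hcond]
      rw [ih done (cur ++ [w]) acc]
      simp [List.append_assoc, hlen, Nat.add_assoc]

-- ===== VERDICT (by name: the statement is the Claim_ definition above) =====
theorem divide_paragraph_spec : Claim_equal_divide_paragraph := by
  intro obj _
  show divide_paragraph obj = divide_paragraph_alt obj
  unfold divide_paragraph divide_paragraph_alt
  simpa using pv_key (PySem.Str.split₀ obj) [] [] []
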